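-- pv_equiv track=rewrite | github.com/onp/gmcr-py | data_03_gmcrUtilities.py | _subtractPattern
-- ===== SOURCE A (Python) =====
-- bitFlip = {'N': 'Y', 'Y': 'N'}
--
-- def _subtractPattern(feas, sub):
--     """Remove infeasible condition 'sub' from feasible condition 'feas'."""
--     if len(feas) != len(sub):
--         raise ValueError("Patterns have different lengths.")
--     sub = [x for x in enumerate(sub) if x[1] != '-']
--     # check if targ overlaps with state:
--     for x in sub:
--         idx, val = x
--         if feas[idx] == bitFlip[val]:  # if no overlap then no change,
--             return [feas]              # and return the same feasible condition
--     # subtract overlap if it exists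
--     remainingStates = []
--     curr = feas
--     for x in sub:
--         idx, val = x
--         if curr[idx] == '-':
--             remainingStates.append(curr[:idx] + bitFlip[val] + curr[idx+1:])
--             curr = curr[:idx] + val + curr[idx+1:]
--     return remainingStates
-- ===== SOURCE B (Python) =====
-- bitFlip = {'N': 'Y', 'Y': 'N'}
--
-- def _subtractPattern(feas, sub):
--     """Remove infeasible condition 'sub' from feasible condition 'feas'."""
--     if len(feas) != len(sub):
--         raise ValueError("Patterns have different lengths.")
--     # no overlap iff some fixed position of sub is opposite in feas
--     if any(v != '-' and feas[i] == bitFlip[v] for i, v in enumerate(sub)):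
--         return [feas]
--     # positions split by the subtraction: fixed in sub, wildcard in feas
--     conflicts = [i for i, v in enumerate(sub) if v != '-' and feas[i] == '-']
--     # k-th remainder: earlier conflict positions take sub's value, the k-th is flipped
--     return [''.join(bitFlip[sub[m]] if m == p else
--                     sub[m] if m in conflicts and m < p else c
--                     for m, c in enumerate(feas))
--             for p in conflicts]
-- ===== Notes on version B (the rewrite author's own statement) =====
-- stated objective: alternative
-- what changed: Replaces A's stateful loop over an evolving 'curr' pattern with a closed-form construction: a single any() overlap pre-check, the list of conflict positions computed once against feas, and each remainder pattern built independently by a per-character rule (flip at the k-th conflict, sub's value at earlier conflicts, feas's character elsewhere).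
import Mathlib
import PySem

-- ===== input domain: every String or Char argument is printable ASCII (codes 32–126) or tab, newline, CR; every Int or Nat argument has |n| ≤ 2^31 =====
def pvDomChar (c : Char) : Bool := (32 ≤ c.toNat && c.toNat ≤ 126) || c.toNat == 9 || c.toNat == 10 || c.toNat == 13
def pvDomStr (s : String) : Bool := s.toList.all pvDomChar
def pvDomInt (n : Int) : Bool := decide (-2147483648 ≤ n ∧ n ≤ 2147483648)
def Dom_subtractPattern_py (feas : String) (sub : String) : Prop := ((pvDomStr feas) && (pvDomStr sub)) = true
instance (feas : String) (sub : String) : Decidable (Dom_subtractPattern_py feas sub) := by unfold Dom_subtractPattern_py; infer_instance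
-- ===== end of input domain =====

-- B replaces A's stateful loop over an evolving pattern by a closed-form construction of each remainder pattern (objective: alternative decomposition, same result).

-- ===== PORT A =====
-- bitFlip dict lookup; exact for v ∈ {'N','Y'}, which Pre_ guarantees (other chars raise KeyError in Python)
def pvBitFlip (c : Char) : Char := if c = 'N' then 'Y' else 'N'

-- A's first loop: early return [feas] on the first opposite fixed position
def pvOverlapA (fl : List Char) : List (Int × Char) → Bool
  | [] => false
  | (i, v) :: rest => if PySem.List.pyGetD fl i ' ' = pvBitFlip v then true else pvOverlapA fl rest

-- A's second loop: remainingStates accumulator plus the evolving curr pattern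
def pvLoopA (acc : List (List Char)) (curr : List Char) : List (Int × Char) → List (List Char)
  | [] => acc
  | (i, v) :: rest =>
    if PySem.List.pyGetD curr i ' ' = '-' then
      pvLoopA (acc ++ [PySem.List.slice curr none (some i) ++ [pvBitFlip v] ++ PySem.List.slice curr (some (i + 1)) none])
        (PySem.List.slice curr none (some i) ++ [v] ++ PySem.List.slice curr (some (i + 1)) none) rest
    else pvLoopA acc curr rest

def subtractPattern_py (feas : String) (sub : String) : List String :=
  if feas.toList.length ≠ sub.toList.length then []   -- ValueError in Python; excluded by Pre_
  else
    let subF := (PySem.List.enumerate sub.toList).filter (fun x => x.2 ≠ '-')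
    if pvOverlapA feas.toList subF then [feas]
    else (pvLoopA [] feas.toList subF).map String.ofList

-- ===== PORT B =====
-- (Source B uses the same module-level bitFlip dict, ported above as pvBitFlip)
def subtractPattern_py_alt (feas : String) (sub : String) : List String :=
  if feas.toList.length ≠ sub.toList.length then []   -- ValueError in Python; excluded by Pre_
  else
    let f := feas.toList
    let s := sub.toList
    if (PySem.List.enumerate s).any
        (fun x => (x.2 != '-') && (PySem.List.pyGetD f x.1 ' ' == pvBitFlip x.2)) then [feas]
    else
      let conflicts : List Int := ((PySem.List.enumerate s).filter
        (fun x => (x.2 != '-') && (PySem.List.pyGetD f x.1 ' ' == '-'))).map (fun x => x.1)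
      conflicts.map (fun p => String.ofList ((PySem.List.enumerate f).map (fun (mc : Int × Char) =>
        if mc.1 = p then pvBitFlip (PySem.List.pyGetD s mc.1 ' ')
        else if mc.1 ∈ conflicts ∧ mc.1 < p then PySem.List.pyGetD s mc.1 ' '
        else mc.2)))

-- ===== PRECONDITION & SPEC =====
-- Pre_ excludes the inputs on which A raises: length mismatch (ValueError) and
-- non-'-' characters of sub outside {'N','Y'} (KeyError in bitFlip).
def Pre_subtractPattern_py (feas : String) (sub : String) : Prop :=
  feas.toList.length = sub.toList.length ∧
  (sub.toList.all (fun c => c == '-' || c == 'N' || c == 'Y')) = true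
instance (feas : String) (sub : String) : Decidable (Pre_subtractPattern_py feas sub) := by
  unfold Pre_subtractPattern_py; infer_instance

def pvWitness_subtractPattern_py : String × String := ("Y--", "YYN")

def Spec_subtractPattern_py (feas : String) (sub : String) (out : List String) : Prop := out = subtractPattern_py_alt feas sub
instance (feas : String) (sub : String) (out : List String) : Decidable (Spec_subtractPattern_py feas sub out) := by unfold Spec_subtractPattern_py; infer_instance

-- ===== CLAIM (what is proved, stated in full; the proofs are below) =====
def Claim_equal_subtractPattern_py : Prop := ∀ (feas : String) (sub : String), Dom_subtractPattern_py feas sub → Pre_subtractPattern_py feas sub → Spec_subtractPattern_py feas sub (subtractPattern_py feas sub)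

-- ===== LEMMAS AND PROOFS =====

-- A's overlap loop is an 'any' over the filtered pairs
theorem pvOverlap_eq_any (fl : List Char) (l : List (Int × Char)) :
    pvOverlapA fl l = l.any (fun x => PySem.List.pyGetD fl x.1 ' ' == pvBitFlip x.2) := by
  induction l with
  | nil => rfl
  | cons p rest ih =>
    obtain ⟨i, v⟩ := p
    simp only [pvOverlapA, List.any_cons, ih]
    by_cases h : PySem.List.pyGetD fl i ' ' = pvBitFlip v <;> simp [h]

theorem pvLoopA_append (l : List (Int × Char)) (acc : List (List Char)) (curr : List Char) :
    pvLoopA acc curr l = acc ++ pvLoopA [] curr l := by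
  induction l generalizing acc curr with
  | nil => simp [pvLoopA]
  | cons p rest ih =>
    obtain ⟨i, v⟩ := p
    simp only [pvLoopA]
    split_ifs with h
    · rw [ih (acc ++ [_]), ih ([] ++ [_])]; simp
    · exact ih _ _

-- ghost recursion: A's loop with the slice surgery replaced by pySetD
def pvG (curr : List Char) : List (Int × Char) → List (List Char)
  | [] => []
  | (i, v) :: rest =>
    if PySem.List.pyGetD curr i ' ' = '-' then
      PySem.List.pySetD curr i (pvBitFlip v) :: pvG (PySem.List.pySetD curr i v) rest
    else pvG curr rest

theorem slice_surgery (curr : List Char) (i : Int) (c : Char)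
    (h0 : 0 ≤ i) (h1 : i < (curr.length : Int)) :
    PySem.List.slice curr none (some i) ++ [c] ++ PySem.List.slice curr (some (i + 1)) none
      = PySem.List.pySetD curr i c := by
  rw [PySem.List.slice_to _ h0, PySem.List.slice_from _ (by omega : (0:Int) ≤ i + 1),
      PySem.List.pySetD_of_nonneg _ _ h0,
      List.set_eq_take_append_cons_drop, if_pos (show i.toNat < curr.length by omega)]
  have h2 : (i + 1).toNat = i.toNat + 1 := by omega
  simp [h2]

theorem loopA_eq_G (l : List (Int × Char)) (curr : List Char)
    (hbd : ∀ p ∈ l, 0 ≤ p.1 ∧ p.1 < (curr.length : Int)) :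
    pvLoopA [] curr l = pvG curr l := by
  induction l generalizing curr with
  | nil => rfl
  | cons p rest ih =>
    obtain ⟨i, v⟩ := p
    obtain ⟨h0, h1⟩ := hbd (i, v) (by simp)
    simp only [pvLoopA, pvG]
    split_ifs with h
    · rw [pvLoopA_append, slice_surgery curr i (pvBitFlip v) h0 h1,
          slice_surgery curr i v h0 h1]
      simp only [List.nil_append, List.singleton_append]
      congr 1
      exact ih _ (fun q hq => by
        have := hbd q (List.mem_cons_of_mem _ hq)
        simpa [PySem.List.length_pySetD] using this)
    · exact ih _ (fun q hq => hbd q (List.mem_cons_of_mem _ hq))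

-- setting one position, written as a map over enumerate
theorem map_enum_ite_set (xs : List Char) (i : Int) (c : Char) (h0 : 0 ≤ i) :
    (PySem.List.enumerate xs 0).map (fun mc => if mc.1 = i then c else mc.2)
      = PySem.List.pySetD xs i c := by
  rw [PySem.List.pySetD_of_nonneg _ _ h0]
  apply List.ext_getElem
  · simp [PySem.List.length_enumerate]
  · intro k hk hk'
    have hk2 : k < xs.length := by simpa using hk'
    simp only [List.getElem_map, PySem.List.getElem_enumerate, List.getElem_set]
    by_cases hc : k = i.toNat
    · rw [if_pos (by omega : ((0:Int) + k = i)), if_pos hc.symm]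
    · rw [if_neg (by omega : ¬ ((0:Int) + k = i)), if_neg (fun e => hc e.symm)]

-- B's conflict positions / per-pattern rule, as proof-side abbreviations
def pvPick (curr : List Char) (l : List (Int × Char)) : List Int :=
  (l.filter (fun x => PySem.List.pyGetD curr x.1 ' ' == '-')).map (fun x => x.1)

def pvBuild (curr : List Char) (P : List Int) (val : Int → Char) (p : Int) : List Char :=
  (PySem.List.enumerate curr 0).map (fun mc =>
    if mc.1 = p then pvBitFlip (val mc.1)
    else if mc.1 ∈ P ∧ mc.1 < p then val mc.1 else mc.2)

theorem mem_pvPick (curr : List Char) (l : List (Int × Char)) (q : Int)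
    (h : q ∈ pvPick curr l) : ∃ x ∈ l, x.1 = q := by
  unfold pvPick at h
  obtain ⟨x, hx, rfl⟩ := List.mem_map.mp h
  exact ⟨x, (List.mem_filter.mp hx).1, rfl⟩

-- the heart: the ghost recursion produces B's closed-form patterns
theorem G_closed_form (l : List (Int × Char)) :
    ∀ (curr : List Char) (val : Int → Char),
    l.Pairwise (fun a b => a.1 < b.1) →
    (∀ p ∈ l, 0 ≤ p.1 ∧ p.1 < (curr.length : Int)) →
    (∀ p ∈ l, p.2 = val p.1) →
    pvG curr l = (pvPick curr l).map (pvBuild curr (pvPick curr l) val) := by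
  induction l with
  | nil => intro curr val _ _ _; rfl
  | cons hd rest ih =>
    intro curr val hinc hbd hval
    obtain ⟨i, v⟩ := hd
    obtain ⟨h0, h1⟩ := hbd (i, v) (by simp)
    have hvi : v = val i := hval (i, v) (by simp)
    have hlt : ∀ b ∈ rest, i < b.1 := fun b hb => List.rel_of_pairwise_cons hinc hb
    have hpickR_gt : ∀ q ∈ pvPick curr rest, i < q := by
      intro q hq
      obtain ⟨x, hx, rfl⟩ := mem_pvPick curr rest q hq
      exact hlt x hx
    have hbd' : ∀ p ∈ rest, 0 ≤ p.1 ∧ p.1 < (curr.length : Int) :=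
      fun p hp => hbd p (List.mem_cons_of_mem _ hp)
    simp only [pvG]
    by_cases h : PySem.List.pyGetD curr i ' ' = '-'
    · rw [if_pos h]
      have hfilter : pvPick curr ((i, v) :: rest) = i :: pvPick curr rest := by
        unfold pvPick
        rw [List.filter_cons, if_pos (by simp [h])]
        rfl
      rw [hfilter, List.map_cons]
      have hset : PySem.List.pySetD curr i v = curr.set i.toNat v :=
        PySem.List.pySetD_of_nonneg _ _ h0
      have hlen' : (PySem.List.pySetD curr i v).length = curr.length := by
        simp [hset]
      have hget' : ∀ (q : Int), q ≠ i → 0 ≤ q → q < (curr.length : Int) →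
          PySem.List.pyGetD (PySem.List.pySetD curr i v) q ' ' = PySem.List.pyGetD curr q ' ' := by
        intro q hqi hq0 hq1
        have e1 : ((i.toNat : Nat) : Int) = i := by omega
        have e2 : ((q.toNat : Nat) : Int) = q := by omega
        rw [← e1, ← e2, PySem.List.pyGetD_pySetD_natCast _ _ _ _ _ (by omega), if_neg (by omega)]
      have hpick' : pvPick (PySem.List.pySetD curr i v) rest = pvPick curr rest := by
        unfold pvPick
        congr 1
        apply List.filter_congr
        intro x hx
        rw [hget' x.1 (by have := hlt x hx; omega) (hbd' x hx).1 (hbd' x hx).2]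
      have ihr := ih (PySem.List.pySetD curr i v) val (List.Pairwise.of_cons hinc)
        (fun p hp => by rw [hlen']; exact hbd' p hp)
        (fun p hp => hval p (List.mem_cons_of_mem _ hp))
      rw [ihr, hpick']
      -- head pattern
      have hhead : pvBuild curr (i :: pvPick curr rest) val i = PySem.List.pySetD curr i (pvBitFlip v) := by
        unfold pvBuild
        rw [← map_enum_ite_set curr i (pvBitFlip v) h0]
        apply List.map_congr_left
        intro mc _
        by_cases hmi : mc.1 = i
        · rw [if_pos hmi, if_pos hmi, hmi, ← hvi]
        · rw [if_neg hmi, if_neg hmi, if_neg]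
          rintro ⟨hm, hltm⟩
          rcases List.mem_cons.mp hm with he | hm'
          · exact hmi he
          · exact absurd hltm (by have := hpickR_gt _ hm'; omega)
      rw [hhead]
      congr 1
      -- tail patterns
      apply List.map_congr_left
      intro p hp
      have hip : i < p := hpickR_gt p hp
      unfold pvBuild
      apply List.ext_getElem
      · simp [PySem.List.length_enumerate, hlen']
      · intro k hk hk'
        have hkc : k < curr.length := by
          simpa [PySem.List.length_enumerate, hlen'] using hk
        have hkc' : k < (PySem.List.pySetD curr i v).length := by rw [hlen']; exact hkc
        simp only [List.getElem_map, PySem.List.getElem_enumerate]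
        by_cases hkp : ((0:Int) + k = p)
        · rw [if_pos hkp, if_pos hkp]
        · rw [if_neg hkp, if_neg hkp]
          by_cases hki : ((0:Int) + k = i)
          · have hknat : k = i.toNat := by omega
            rw [if_neg, if_pos]
            · rw [List.getElem_of_eq hset, List.getElem_set, if_pos hknat.symm, hki, ← hvi]
            · exact ⟨by rw [hki]; exact List.mem_cons_self .., by omega⟩
            · rintro ⟨hm, _⟩
              exact absurd (hpickR_gt _ hm) (by omega)
          · have hmemiff : ((0:Int) + k ∈ i :: pvPick curr rest) ↔ ((0:Int) + k ∈ pvPick curr rest) := by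
              constructor
              · intro hm
                rcases List.mem_cons.mp hm with he | hm'
                · exact absurd he hki
                · exact hm'
              · exact fun hm => List.mem_cons_of_mem _ hm
            by_cases hm2 : ((0:Int) + k ∈ pvPick curr rest ∧ (0:Int) + k < p)
            · rw [if_pos hm2, if_pos ⟨hmemiff.mpr hm2.1, hm2.2⟩]
            · rw [if_neg hm2, if_neg (fun hcon => hm2 ⟨hmemiff.mp hcon.1, hcon.2⟩)]
              rw [List.getElem_of_eq hset, List.getElem_set, if_neg (by omega)]
    · rw [if_neg h]
      have hfilter : pvPick curr ((i, v) :: rest) = pvPick curr rest := by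
        unfold pvPick
        rw [List.filter_cons, if_neg (by simp [h])]
      rw [hfilter]
      exact ih curr val (List.Pairwise.of_cons hinc) hbd'
        (fun p hp => hval p (List.mem_cons_of_mem _ hp))

-- ===== VERDICT (by name: the statement is the Claim_ definition above) =====
theorem subtractPattern_py_spec : Claim_equal_subtractPattern_py := by
  intro feas sub _ hpre
  obtain ⟨hlen, _⟩ := hpre
  unfold Spec_subtractPattern_py subtractPattern_py subtractPattern_py_alt
  have hne : ¬ (feas.toList.length ≠ sub.toList.length) := fun hh => hh hlen
  rw [if_neg hne, if_neg hne]
  simp only []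
  have hanyeq : pvOverlapA feas.toList ((PySem.List.enumerate sub.toList).filter (fun x => x.2 ≠ '-'))
      = (PySem.List.enumerate sub.toList).any
          (fun x => (x.2 != '-') && (PySem.List.pyGetD feas.toList x.1 ' ' == pvBitFlip x.2)) := by
    rw [pvOverlap_eq_any, List.any_filter]
    exact PySem.List.any_congr_mem (fun x _ => by by_cases hx : x.2 = '-' <;> simp [hx])
  rw [hanyeq]
  by_cases hov : ((PySem.List.enumerate sub.toList).any
      (fun x => (x.2 != '-') && (PySem.List.pyGetD feas.toList x.1 ' ' == pvBitFlip x.2)) = true)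
  · rw [if_pos hov, if_pos hov]
  · rw [if_neg hov, if_neg hov]
    have hbdf : ∀ p ∈ (PySem.List.enumerate sub.toList).filter (fun x => x.2 ≠ '-'),
        0 ≤ p.1 ∧ p.1 < (feas.toList.length : Int) := by
      intro p hp
      obtain ⟨k, hk, rfl⟩ := (PySem.List.mem_enumerate_iff _ _ _).mp (List.mem_filter.mp hp).1
      constructor
      · show (0:Int) ≤ 0 + (k:Int); omega
      · show (0:Int) + (k:Int) < (feas.toList.length : Int); omega
    have hincf := (PySem.List.pairwise_lt_enumerate sub.toList 0).filter
      (fun x => decide (x.2 ≠ '-'))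
    have hvalf : ∀ p ∈ (PySem.List.enumerate sub.toList).filter (fun x => x.2 ≠ '-'),
        p.2 = (fun j => PySem.List.pyGetD sub.toList j ' ') p.1 := by
      intro p hp
      obtain ⟨k, hk, rfl⟩ := (PySem.List.mem_enumerate_iff _ _ _).mp (List.mem_filter.mp hp).1
      have e : ((0:Int) + (k:Int)) = ((k : Nat) : Int) := by omega
      simp only [e, PySem.List.pyGetD_natCast]
      rw [List.getD_eq_getElem _ _ hk]
    rw [loopA_eq_G _ _ hbdf,
        G_closed_form _ feas.toList (fun j => PySem.List.pyGetD sub.toList j ' ') hincf hbdf hvalf]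
    have hconf : ((PySem.List.enumerate sub.toList).filter
        (fun x => (x.2 != '-') && (PySem.List.pyGetD feas.toList x.1 ' ' == '-'))).map (fun x => x.1)
        = pvPick feas.toList ((PySem.List.enumerate sub.toList).filter (fun x => x.2 ≠ '-')) := by
      unfold pvPick
      rw [List.filter_filter]
      congr 1
      apply List.filter_congr
      intro x _
      by_cases h1 : x.2 = '-' <;> by_cases h2 : PySem.List.pyGetD feas.toList x.1 ' ' = '-' <;>
        simp [h1, h2]
    rw [← hconf, List.map_map]
    apply List.map_congr_left
    intro p _
    simp only [Function.comp, pvBuild, hconf]
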